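-- pv_equiv track=rewrite | github.com/RicardoSdV/stak | src/STAK/injectors.py | uniqueFlagCutoffCombosByRepetitions
-- ===== SOURCE A (Python) =====
-- from collections import OrderedDict, defaultdict
--
-- def uniqueFlagCutoffCombosByRepetitions(stdFlags):  # type: (Tuple[str, ...]) -> Iterator[Tuple[str, int]]
--     combos = defaultdict(int)
--
--     for _str in stdFlags:
--         while _str:
--             combos[_str] += 1
--             _str = _str[1:]
--
--     for combo in sorted(combos, key=len, reverse=True):
--         yield combo, combos[combo]
-- ===== SOURCE B (Python) =====
-- from collections import Counter
--
-- def uniqueFlagCutoffCombosByRepetitions(stdFlags):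
--     counts = Counter()
--     for s in stdFlags:
--         counts.update(s[i:] for i in range(len(s)))
--
--     buckets = {}
--     for combo, n in counts.items():
--         buckets.setdefault(len(combo), []).append((combo, n))
--
--     for length in sorted(buckets, reverse=True):
--         for pair in buckets[length]:
--             yield pair
-- ===== Notes on version B (the rewrite author's own statement) =====
-- stated objective: alternative
-- what changed: B counts suffixes via an index/slice loop feeding a Counter and replaces A's comparison sort of the keys (sorted key=len reverse=True) by a length-indexed bucket table built in first-seen order and walked from the longest length down.
import Mathlib
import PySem

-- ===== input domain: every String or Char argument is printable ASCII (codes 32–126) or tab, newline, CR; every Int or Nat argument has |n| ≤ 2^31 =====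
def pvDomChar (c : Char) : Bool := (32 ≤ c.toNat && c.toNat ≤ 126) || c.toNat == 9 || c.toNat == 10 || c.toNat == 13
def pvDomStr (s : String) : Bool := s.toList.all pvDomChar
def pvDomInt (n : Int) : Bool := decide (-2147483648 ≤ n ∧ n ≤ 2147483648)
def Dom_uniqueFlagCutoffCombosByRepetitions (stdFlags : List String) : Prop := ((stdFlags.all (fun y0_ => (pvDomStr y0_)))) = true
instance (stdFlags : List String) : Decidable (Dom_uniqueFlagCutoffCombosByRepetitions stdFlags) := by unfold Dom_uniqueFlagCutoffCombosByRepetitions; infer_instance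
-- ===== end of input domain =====

-- B replaces A's comparison sort of the suffix-count keys by a length-indexed bucket table
-- walked from the longest length down (objective: alternative decomposition, same result).

-- ===== PORT A =====
-- 'while _str: combos[_str] += 1; _str = _str[1:]' — structural recursion on the chars of _str
def pvSufLoopA (d : PySem.Dict String Int) (cs : List Char) : PySem.Dict String Int :=
  match cs with
  | [] => d
  | c :: t => pvSufLoopA (d.modify (String.ofList (c :: t)) 0 (· + 1)) t

def uniqueFlagCutoffCombosByRepetitions (stdFlags : List String) : List (String × Int) :=
  let combos := stdFlags.foldl (fun d s => pvSufLoopA d s.toList) PySem.Dict.empty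
  (PySem.List.sorted combos.keys PySem.Str.len true).map (fun combo => (combo, combos.getD combo 0))

-- ===== PORT B =====
def uniqueFlagCutoffCombosByRepetitions_alt (stdFlags : List String) : List (String × Int) :=
  -- counts.update(s[i:] for i in range(len(s)))
  let counts := stdFlags.foldl (fun d s =>
    (PySem.List.pyRange 0 (PySem.Str.len s) 1).foldl
      (fun d i => d.modify (PySem.Str.slice s (some i) none) 0 (· + 1)) d) PySem.Dict.empty
  -- buckets.setdefault(len(combo), []).append((combo, n))
  let buckets := counts.items.foldl
    (fun b p => b.modify (PySem.Str.len p.1) [] (· ++ [p])) PySem.Dict.empty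
  -- for length in sorted(buckets, reverse=True): yield from buckets[length]
  (PySem.List.sorted buckets.keys (fun x => x) true).flatMap (fun L => buckets.getD L [])

-- ===== PRECONDITION & SPEC =====
def Spec_uniqueFlagCutoffCombosByRepetitions (stdFlags : List String) (out : List (String × Int)) : Prop := out = uniqueFlagCutoffCombosByRepetitions_alt stdFlags
instance (stdFlags : List String) (out : List (String × Int)) : Decidable (Spec_uniqueFlagCutoffCombosByRepetitions stdFlags out) := by unfold Spec_uniqueFlagCutoffCombosByRepetitions; infer_instance

-- ===== CLAIM (what is proved, stated in full; the proofs are below) =====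
def Claim_equal_uniqueFlagCutoffCombosByRepetitions : Prop := ∀ (stdFlags : List String), Dom_uniqueFlagCutoffCombosByRepetitions stdFlags → Spec_uniqueFlagCutoffCombosByRepetitions stdFlags (uniqueFlagCutoffCombosByRepetitions stdFlags)

-- ===== LEMMAS AND PROOFS =====

-- The per-string increment step shared (after rewriting) by the two counting loops.
def pvStep (d : PySem.Dict String Int) (x : String) : PySem.Dict String Int := d.modify x 0 (· + 1)

def pvSufs (cs : List Char) : List String :=
  (List.range cs.length).map (fun k => String.ofList (cs.drop k))

theorem pvSufLoopA_eq_foldl (cs : List Char) (d : PySem.Dict String Int) :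
    pvSufLoopA d cs = (pvSufs cs).foldl pvStep d := by
  induction cs generalizing d with
  | nil => simp [pvSufLoopA, pvSufs]
  | cons c t ih =>
      simp only [pvSufLoopA, pvSufs, List.length_cons, List.range_succ_eq_map,
        List.map_cons, List.map_map, List.foldl_cons, List.drop_zero]
      rw [ih]
      rfl

theorem pvInnerB_eq_foldl (s : String) (d : PySem.Dict String Int) :
    (PySem.List.pyRange 0 (PySem.Str.len s) 1).foldl
      (fun d i => d.modify (PySem.Str.slice s (some i) none) 0 (· + 1)) d
    = (pvSufs s.toList).foldl pvStep d := by
  rw [PySem.Str.len_eq, PySem.List.pyRange_zero_nat, List.foldl_map, pvSufs, List.foldl_map]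
  have h : (fun (d : PySem.Dict String Int) (k : Nat) =>
        d.modify (PySem.Str.slice s (some ((k : Nat) : Int)) none) 0 (· + 1))
      = fun d k => pvStep d (String.ofList (s.toList.drop k)) := by
    funext d k
    have hs : PySem.Str.slice s (some ((k : Nat) : Int)) none = String.ofList (s.toList.drop k) := by
      show String.ofList (PySem.Chars.slice s.toList (some ((k : Nat) : Int)) none) = _
      rw [show @PySem.Chars.slice = @PySem.List.slice (α := Char) from rfl,
        PySem.List.slice_from_natCast]
    rw [hs]
    rfl
  rw [h]

theorem pvCounts_eq (stdFlags : List String) :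
    stdFlags.foldl (fun d s =>
      (PySem.List.pyRange 0 (PySem.Str.len s) 1).foldl
        (fun d i => d.modify (PySem.Str.slice s (some i) none) 0 (· + 1)) d) PySem.Dict.empty
    = stdFlags.foldl (fun d s => pvSufLoopA d s.toList) PySem.Dict.empty := by
  have h : (fun (d : PySem.Dict String Int) (s : String) =>
      (PySem.List.pyRange 0 (PySem.Str.len s) 1).foldl
        (fun d i => d.modify (PySem.Str.slice s (some i) none) 0 (· + 1)) d)
      = fun d s => pvSufLoopA d s.toList := by
    funext d s
    rw [pvInnerB_eq_foldl, pvSufLoopA_eq_foldl]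
  rw [h]

theorem pvSufLoopA_nodup_keys (cs : List Char) (d : PySem.Dict String Int)
    (h : d.keys.Nodup) : (pvSufLoopA d cs).keys.Nodup := by
  induction cs generalizing d with
  | nil => exact h
  | cons c t ih =>
      exact ih _ (PySem.Dict.nodup_keys_foldl_modify_key [String.ofList (c :: t)]
        (fun x => x) 0 (fun _ _ => (· + 1)) d h)

theorem pvCounts_nodup_keys (stdFlags : List String) :
    (stdFlags.foldl (fun d s => pvSufLoopA d s.toList) PySem.Dict.empty).keys.Nodup := by
  have h : ∀ (l : List String) (d : PySem.Dict String Int), d.keys.Nodup →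
      (l.foldl (fun d s => pvSufLoopA d s.toList) d).keys.Nodup := by
    intro l
    induction l with
    | nil => intro d h; exact h
    | cons s t ih => intro d h; exact ih _ (pvSufLoopA_nodup_keys s.toList d h)
  exact h stdFlags PySem.Dict.empty PySem.Dict.nodup_keys_empty

-- generic stable-reverse-sort facts ---------------------------------------------------------

theorem pvInsertBy_prefix {α : Type} (before : α → α → Bool) (x : α) (pre rest : List α)
    (h : ∀ b ∈ pre, before x b = false) :
    PySem.List.insertBy before x (pre ++ rest) = pre ++ PySem.List.insertBy before x rest := by
  induction pre with
  | nil => simp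
  | cons b t ih =>
      have hb : before x b = false := h b (by simp)
      simp [PySem.List.insertBy, hb, ih (fun y hy => h y (by simp [hy]))]

theorem pvInsertBy_head {α : Type} (before : α → α → Bool) (x : α) (suf : List α)
    (h : ∀ b ∈ suf, before x b = true) :
    PySem.List.insertBy before x suf = x :: suf := by
  cases suf with
  | nil => simp [PySem.List.insertBy]
  | cons b t => simp [PySem.List.insertBy, h b (by simp)]

def pvDecomp {α : Type} (key : α → Int) (ℓ : List Int) (ys : List α) : List α :=
  ℓ.flatMap (fun L => ys.filter (fun a => key a == L))

theorem pvMem_decomp_key {α : Type} (key : α → Int) (ℓ : List Int) (ys : List α)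
    (b : α) (hb : b ∈ pvDecomp key ℓ ys) : key b ∈ ℓ := by
  simp only [pvDecomp, List.mem_flatMap, List.mem_filter] at hb
  obtain ⟨L, hL, _, hk⟩ := hb
  rw [beq_iff_eq] at hk
  exact hk ▸ hL

theorem pvDecomp_cons {α : Type} (key : α → Int) (L : Int) (t : List Int) (ys : List α) :
    pvDecomp key (L :: t) ys = ys.filter (fun a => key a == L) ++ pvDecomp key t ys := by
  simp [pvDecomp]

theorem pvDecomp_snoc_not_mem {α : Type} (key : α → Int) (ℓ : List Int) (x : α) (ys : List α)
    (h : ∀ M ∈ ℓ, key x ≠ M) : pvDecomp key ℓ (ys ++ [x]) = pvDecomp key ℓ ys := by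
  induction ℓ with
  | nil => rfl
  | cons L t ih =>
      rw [pvDecomp_cons, pvDecomp_cons, List.filter_append]
      have hfx : [x].filter (fun a => key a == L) = [] := by
        simp [h L (List.mem_cons_self)]
      rw [hfx, List.append_nil, ih (fun M hM => h M (List.mem_cons_of_mem L hM))]

theorem pvInsert_decomp {α : Type} (key : α → Int) (ℓ : List Int)
    (hs : ℓ.Pairwise (· > ·)) (x : α) (hx : key x ∈ ℓ) (ys : List α) :
    PySem.List.insertBy (fun a b => decide (key b < key a)) x (pvDecomp key ℓ ys)
      = pvDecomp key ℓ (ys ++ [x]) := by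
  induction ℓ generalizing ys with
  | nil => cases hx
  | cons L t ih =>
      have hgt : ∀ M ∈ t, L > M := fun M hM => (List.pairwise_cons.mp hs).1 M hM
      have hs' : t.Pairwise (· > ·) := (List.pairwise_cons.mp hs).2
      rw [pvDecomp_cons, pvDecomp_cons, List.filter_append]
      by_cases hxl : key x = L
      · have hpre : ∀ b ∈ ys.filter (fun a => key a == L),
            (fun a b => decide (key b < key a)) x b = false := by
          intro b hb
          have hbL := (List.mem_filter.mp hb).2
          rw [beq_iff_eq] at hbL
          simp [hbL, hxl]
        have hrest : ∀ b ∈ pvDecomp key t ys,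
            (fun a b => decide (key b < key a)) x b = true := by
          intro b hb
          have hkb := pvMem_decomp_key key t ys b hb
          have : key b < key x := by rw [hxl]; exact hgt _ hkb
          simpa using this
        rw [pvInsertBy_prefix _ x _ _ hpre, pvInsertBy_head _ x _ hrest]
        have hfx : [x].filter (fun a => key a == L) = [x] := by simp [hxl]
        rw [hfx]
        rw [pvDecomp_snoc_not_mem key t x ys
          (fun M hM => by rw [hxl]; exact ne_of_gt (hgt M hM))]
        simp
      · have hxt : key x ∈ t := by
          rcases List.mem_cons.mp hx with h | h
          · exact absurd h hxl
          · exact h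
        have hltL : key x < L := hgt _ hxt
        have hpre : ∀ b ∈ ys.filter (fun a => key a == L),
            (fun a b => decide (key b < key a)) x b = false := by
          intro b hb
          have hbL := (List.mem_filter.mp hb).2
          rw [beq_iff_eq] at hbL
          simp [hbL]
          omega
        rw [pvInsertBy_prefix _ x _ _ hpre, ih hs' hxt ys]
        have hfx : [x].filter (fun a => key a == L) = [] := by simp [hxl]
        rw [hfx, List.append_nil]

theorem pvFoldl_insert_decomp {α : Type} (key : α → Int) (ℓ : List Int)
    (hs : ℓ.Pairwise (· > ·)) (xs ys : List α) (hc : ∀ a ∈ xs, key a ∈ ℓ) :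
    xs.foldl (fun acc x => PySem.List.insertBy (fun a b => decide (key b < key a)) x acc)
        (pvDecomp key ℓ ys)
      = pvDecomp key ℓ (ys ++ xs) := by
  induction xs generalizing ys with
  | nil => simp
  | cons x t ih =>
      simp only [List.foldl_cons]
      rw [pvInsert_decomp key ℓ hs x (hc x (by simp)) ys,
        ih (ys ++ [x]) (fun a ha => hc a (by simp [ha]))]
      simp

theorem pvSorted_rev_eq_decomp {α : Type} (key : α → Int) (ℓ : List Int)
    (hs : ℓ.Pairwise (· > ·)) (xs : List α) (hc : ∀ a ∈ xs, key a ∈ ℓ) :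
    PySem.List.sorted xs key true = pvDecomp key ℓ xs := by
  rw [PySem.List.sorted_rev_eq_foldl_insertBy]
  have h0 : pvDecomp key ℓ ([] : List α) = [] := by simp [pvDecomp]
  have := pvFoldl_insert_decomp key ℓ hs xs [] hc
  rw [h0] at this
  simpa using this

theorem pvInsertBy_map {α β : Type} (g : α → β) (bα : α → α → Bool) (bβ : β → β → Bool)
    (hcomm : ∀ a b, bβ (g a) (g b) = bα a b) (x : α) (acc : List α) :
    PySem.List.insertBy bβ (g x) (acc.map g) = (PySem.List.insertBy bα x acc).map g := by
  induction acc with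
  | nil => simp [PySem.List.insertBy]
  | cons a t ih =>
      simp only [List.map_cons, PySem.List.insertBy, hcomm]
      by_cases h : bα x a
      · simp [h]
      · simp [h, ih]

theorem pvSorted_rev_map {α β κ : Type} [LinearOrder κ] (g : α → β) (key : β → κ) (ys : List α) :
    PySem.List.sorted (ys.map g) key true = (PySem.List.sorted ys (fun y => key (g y)) true).map g := by
  rw [PySem.List.sorted_rev_eq_foldl_insertBy, PySem.List.sorted_rev_eq_foldl_insertBy,
    List.foldl_map]
  have h : ∀ (l : List α) (acc : List α),
      l.foldl (fun acc' y => PySem.List.insertBy (fun a b => decide (key b < key a)) (g y) acc')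
        (acc.map g)
      = (l.foldl (fun acc' y =>
          PySem.List.insertBy (fun a b => decide (key (g b) < key (g a))) y acc') acc).map g := by
    intro l
    induction l with
    | nil => intro acc; rfl
    | cons y t ih =>
        intro acc
        simp only [List.foldl_cons]
        rw [pvInsertBy_map g (fun a b => decide (key (g b) < key (g a)))
          (fun a b => decide (key b < key a)) (fun a b => rfl) y acc]
        exact ih _
  simpa using h ys []

-- the main proof ----------------------------------------------------------------------------

theorem pvCore (D : PySem.Dict String Int) (hnd : D.keys.Nodup) :
    (PySem.List.sorted D.keys PySem.Str.len true).map (fun combo => (combo, D.getD combo 0))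
    = (PySem.List.sorted
        (D.items.foldl (fun b p => b.modify (PySem.Str.len p.1) [] (· ++ [p])) PySem.Dict.empty).keys
        (fun x => x) true).flatMap
        (fun L => (D.items.foldl (fun b p => b.modify (PySem.Str.len p.1) [] (· ++ [p]))
          PySem.Dict.empty).getD L []) := by
  set B2 := D.items.foldl (fun b p => b.modify (PySem.Str.len p.1) [] (· ++ [p])) PySem.Dict.empty with hB
  have hndB : B2.keys.Nodup :=
    PySem.Dict.nodup_keys_foldl_modify_key D.items (fun p => PySem.Str.len p.1) []
      (fun _ p => (· ++ [p])) PySem.Dict.empty PySem.Dict.nodup_keys_empty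
  set ℓ := PySem.List.sorted B2.keys (fun x => x) true with hl
  have hperm : ℓ.Perm B2.keys := PySem.List.sorted_perm _ _ _
  have hndl : ℓ.Nodup := hperm.symm.nodup hndB
  have hge : ℓ.Pairwise (fun a b => b ≤ a) := PySem.List.sorted_pairwise_rev _ _
  have hgt : ℓ.Pairwise (· > ·) := by
    have hne : ℓ.Pairwise (· ≠ ·) := hndl
    exact (hge.and hne).imp (fun {a b} h => lt_of_le_of_ne h.1 (Ne.symm h.2))
  have hkeys : B2.keys = PySem.Set.ofList (D.items.map (fun p => PySem.Str.len p.1)) := by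
    rw [hB, PySem.Dict.keys_foldl_modify_key,
      show (PySem.Dict.empty : PySem.Dict Int (List (String × Int))).keys = [] from rfl,
      PySem.Set.update_nil_left]
  have hc : ∀ p ∈ D.items, (fun p : String × Int => PySem.Str.len p.1) p ∈ ℓ := by
    intro p hp
    rw [hl, PySem.List.mem_sorted, hkeys, PySem.Set.mem_ofList]
    exact List.mem_map_of_mem hp
  have hbucket : ∀ L, B2.getD L [] = D.items.filter (fun p => PySem.Str.len p.1 == L) := by
    intro L
    rw [hB, show (D.items.foldl (fun b p => b.modify (PySem.Str.len p.1) [] (· ++ [p]))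
          PySem.Dict.empty)
        = (D.items.map (fun p => ((PySem.Str.len p.1 : Int), p))).foldl
            (fun b q => b.modify q.1 [] (· ++ [q.2])) PySem.Dict.empty from
        (List.foldl_map (f := fun p : String × Int => ((PySem.Str.len p.1 : Int), p))
          (g := fun b q => b.modify q.1 [] (· ++ [q.2])) (l := D.items)
          (init := PySem.Dict.empty)).symm,
      PySem.Dict.getD_foldl_modify_append, List.filter_map, List.map_map]
    simp only [PySem.Dict.getD_empty, List.nil_append]
    rw [show ((fun x : Int × (String × Int) => x.2) ∘
          fun p : String × Int => ((PySem.Str.len p.1 : Int), p)) = id from rfl,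
      show ((fun q : Int × (String × Int) => q.1 == L) ∘
          fun p : String × Int => ((PySem.Str.len p.1 : Int), p))
        = (fun p : String × Int => PySem.Str.len p.1 == L) from rfl,
      List.map_id]
  have h1 : (PySem.List.sorted D.keys PySem.Str.len true).map (fun combo => (combo, D.getD combo 0))
      = PySem.List.sorted (D.keys.map (fun combo => (combo, D.getD combo 0)))
          (fun p : String × Int => PySem.Str.len p.1) true := by
    rw [pvSorted_rev_map (fun combo => (combo, D.getD combo 0))
      (fun p : String × Int => PySem.Str.len p.1) D.keys]
  have h2 : D.keys.map (fun combo => (combo, D.getD combo 0)) = D.items :=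
    (PySem.Dict.items_eq_map_keys D hnd 0).symm
  rw [h1, h2, pvSorted_rev_eq_decomp (fun p : String × Int => PySem.Str.len p.1) ℓ hgt D.items hc]
  unfold pvDecomp
  rw [show (fun L => B2.getD L []) = fun L => D.items.filter (fun p => PySem.Str.len p.1 == L)
    from funext hbucket]

theorem pvMain (stdFlags : List String) :
    uniqueFlagCutoffCombosByRepetitions stdFlags = uniqueFlagCutoffCombosByRepetitions_alt stdFlags := by
  simp only [uniqueFlagCutoffCombosByRepetitions, uniqueFlagCutoffCombosByRepetitions_alt]
  rw [pvCounts_eq]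
  exact pvCore _ (pvCounts_nodup_keys stdFlags)

-- ===== VERDICT (by name: the statement is the Claim_ definition above) =====
theorem uniqueFlagCutoffCombosByRepetitions_spec : Claim_equal_uniqueFlagCutoffCombosByRepetitions := by
  intro stdFlags _
  unfold Spec_uniqueFlagCutoffCombosByRepetitions
  exact pvMain stdFlags
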